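-- pv_equiv track=rewrite | github.com/calico-team/calico-fa23 | rotate/submissions/accepted/rotate_dnc.py | solve
-- ===== SOURCE A (Python) =====
-- def solve(N: int, K: int) -> int:
--     if K % 2 == 0:
--         return K // 2
--
--     if N % 2 == 0:
--         return N // 2 + solve(N // 2, K // 2 + 1)
--     else:
--         if K == 1:
--             return N // 2 + 1
--         return N // 2 + 1 + solve(N // 2, K // 2)
-- ===== SOURCE B (Python) =====
-- def solve(N: int, K: int) -> int:
--     total = 0
--     while K % 2:
--         h = N >> 1
--         if N % 2:
--             if K == 1:
--                 return total + h + 1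
--             total, K = total + h + 1, K >> 1
--         else:
--             total, K = total + h, (K >> 1) + 1
--         N = h
--     return total + (K >> 1)
-- ===== Notes on version B (the rewrite author's own statement) =====
-- stated objective: alternative
-- what changed: Replaces A's non-tail recursion by an iterative while-loop carrying a running accumulator `total`, with the loop-while-odd condition, flipped branch order (odd N first) and bit shifts for halving; O(1) stack instead of a recursion stack.
import Mathlib
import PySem

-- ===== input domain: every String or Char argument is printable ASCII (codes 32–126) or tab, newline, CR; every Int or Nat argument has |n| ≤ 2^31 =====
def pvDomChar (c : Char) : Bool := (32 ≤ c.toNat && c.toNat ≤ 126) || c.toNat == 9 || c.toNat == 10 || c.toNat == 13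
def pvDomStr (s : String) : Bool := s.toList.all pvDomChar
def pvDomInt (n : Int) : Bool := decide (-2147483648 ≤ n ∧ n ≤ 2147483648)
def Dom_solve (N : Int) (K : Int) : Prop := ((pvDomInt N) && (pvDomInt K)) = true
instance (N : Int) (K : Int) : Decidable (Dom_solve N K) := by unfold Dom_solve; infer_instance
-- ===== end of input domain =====

-- B replaces A's non-tail recursion by an iterative while-loop (bit shifts for halving,
-- flipped branch order) carrying a running accumulator; equal return value, O(1) stack.

-- ===== PORT A =====
-- Fuel is a totality guard only: on Pre_ the nonzero gap 2N+1-K halves exactly each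
-- recursive step, so with |N|,|K| ≤ 2^31 the depth is < 64 and fuel is never exhausted.
def solveFuelA : Nat → Int → Int → Int
  | 0, _, K => PySem.Int.floordiv K 2
  | fuel + 1, N, K =>
    if PySem.Int.mod K 2 = 0 then PySem.Int.floordiv K 2
    else if PySem.Int.mod N 2 = 0 then
      PySem.Int.floordiv N 2 + solveFuelA fuel (PySem.Int.floordiv N 2) (PySem.Int.floordiv K 2 + 1)
    else if K = 1 then PySem.Int.floordiv N 2 + 1
    else PySem.Int.floordiv N 2 + 1 + solveFuelA fuel (PySem.Int.floordiv N 2) (PySem.Int.floordiv K 2)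

def solve (N : Int) (K : Int) : Int := solveFuelA 64 N K

-- ===== PORT B =====
-- while K % 2: … loop with accumulator `total`; `x >> 1` is Lean's `x >>> 1` (Python-exact,
-- floors on negatives). Same fuel-style totality guard; on fuel exhaustion the loop exits
-- as if the condition failed (unreachable on Pre_).
def loopB : Nat → Int → Int → Int → Int
  | 0, total, _, K => total + (K >>> 1)
  | fuel + 1, total, N, K =>
    if PySem.Int.mod K 2 ≠ 0 then
      let h := N >>> 1
      if PySem.Int.mod N 2 ≠ 0 then
        if K = 1 then total + h + 1
        else loopB fuel (total + h + 1) h (K >>> 1)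
      else loopB fuel (total + h) h ((K >>> 1) + 1)
    else total + (K >>> 1)

def solve_alt (N : Int) (K : Int) : Int := loopB 64 0 N K

-- ===== PRECONDITION & SPEC =====
-- Pre_ excludes exactly the line K = 2N+1, on which Python A raises RecursionError (infinite recursion).
def Pre_solve (N : Int) (K : Int) : Prop := K ≠ 2 * N + 1
instance (N : Int) (K : Int) : Decidable (Pre_solve N K) := by unfold Pre_solve; infer_instance
def pvWitness_solve : Int × Int := (5, 3)

def Spec_solve (N : Int) (K : Int) (out : Int) : Prop := out = solve_alt N K
instance (N : Int) (K : Int) (out : Int) : Decidable (Spec_solve N K out) := by unfold Spec_solve; infer_instance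

-- ===== CLAIM =====
def Claim_equal_solve : Prop := ∀ (N : Int) (K : Int), Dom_solve N K → Pre_solve N K → Spec_solve N K (solve N K)

-- ===== LEMMAS AND PROOFS =====
-- Python's `x >> 1` (Lean's `x >>> 1`) is floor division by 2.
theorem shiftRight_one_eq (n : Int) : n >>> 1 = PySem.Int.floordiv n 2 := by
  rw [PySem.Int.floordiv_eq_ediv_of_pos (by norm_num : (0:Int) < 2)]
  cases n with
  | ofNat a =>
    show Int.ofNat (a >>> 1) = Int.ofNat a / 2
    rw [Nat.shiftRight_eq_div_pow, pow_one]
    exact (Int.natCast_ediv a 2).symm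
  | negSucc a =>
    show Int.negSucc (a >>> 1) = Int.negSucc a / 2
    rw [Nat.shiftRight_eq_div_pow, pow_one]
    simp only [Int.negSucc_eq]
    omega

-- The loop with accumulator computes `total +` A's recursive value, for every fuel.
theorem loopB_eq_add (fuel : Nat) : ∀ (total N K : Int),
    loopB fuel total N K = total + solveFuelA fuel N K := by
  induction fuel with
  | zero => intro total N K; simp [loopB, solveFuelA, shiftRight_one_eq]
  | succ f ih =>
    intro total N K
    simp only [loopB, solveFuelA, shiftRight_one_eq]
    split_ifs <;> first | tauto | ((try rw [ih]); ring)

-- ===== VERDICT =====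
theorem solve_spec : Claim_equal_solve := by
  intro N K _ _
  show solve N K = solve_alt N K
  simp [solve, solve_alt, loopB_eq_add]
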